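-- pv_equiv track=rewrite | github.com/ALTA-DE1-Ilyas-03Jul1999/Basic-Programming-Part4 | problem2/main.py | draw_xyz
-- ===== SOURCE A (Python) =====
-- def draw_xyz(N):
--     pattern = ""
--     for i in range(N):
--         for j in range(N):
--             # Calculate the index based on row and column.
--             index = i * N + j + 1
--
--             # Check if it's a multiple of 3.
--             if index % 3 == 0:
--                 pattern += 'X '
--             # Check if it's an odd index.
--             elif index % 2 == 1:
--                 pattern += 'Y '
--             # Else it's an even index.
--             else:
--                 pattern += 'Z '
--
--         pattern += '\n'
--     return pattern
-- ===== SOURCE B (Python) =====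
-- def draw_xyz(N):
--     # Periodic pattern: the X/Y/Z rule only depends on (index-1) % 6, table 'YZXZYX'.
--     table = "YZXZYX"
--     rows = []
--     for i in range(N):
--         rows.append(''.join(table[(i * N + j) % 6] + ' ' for j in range(N)) + '\n')
--     return ''.join(rows)
-- ===== Notes on version B (the rewrite author's own statement) =====
-- stated objective: simpler
-- what changed: Replaces the per-cell three-way modular branch chain by a precomputed period-6 lookup table 'YZXZYX' and builds the output as a join of per-row joined cells instead of repeated string concatenation onto one accumulator.
import Mathlib
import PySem

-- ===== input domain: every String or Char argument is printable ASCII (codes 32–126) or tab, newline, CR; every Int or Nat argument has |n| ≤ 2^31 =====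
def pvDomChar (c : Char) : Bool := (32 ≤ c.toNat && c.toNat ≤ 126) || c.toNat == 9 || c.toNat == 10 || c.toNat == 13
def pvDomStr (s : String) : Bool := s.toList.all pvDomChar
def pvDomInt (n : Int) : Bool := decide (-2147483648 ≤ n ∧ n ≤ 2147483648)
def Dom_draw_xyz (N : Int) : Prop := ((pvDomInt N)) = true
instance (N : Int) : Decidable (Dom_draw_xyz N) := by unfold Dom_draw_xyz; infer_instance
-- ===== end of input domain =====

-- B replaces A's per-cell three-way modular branching by a precomputed period-6 lookup
-- table "YZXZYX" and builds the output as a join of per-row joins (objective: simpler).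

-- ===== PORT A =====
def draw_xyz (N : Int) : String :=
  (PySem.List.pyRange 0 N 1).foldl (fun pattern i =>
    ((PySem.List.pyRange 0 N 1).foldl (fun pattern j =>
      let index := i * N + j + 1
      if PySem.Int.mod index 3 == 0 then pattern ++ "X "
      else if PySem.Int.mod index 2 == 1 then pattern ++ "Y "
      else pattern ++ "Z ") pattern) ++ "\n") ""

-- ===== PORT B =====
-- table[k] is a 1-char string in Python; pyGet? never returns none here (0 ≤ k % 6 < 6),
-- the none branch only makes the lookup total.
def drawTableGet (k : Int) : String :=
  match PySem.Str.pyGet? "YZXZYX" k with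
  | some c => String.ofList [c]
  | none => ""

def draw_xyz_alt (N : Int) : String :=
  PySem.Str.join "" ((PySem.List.pyRange 0 N 1).map (fun i =>
    PySem.Str.join "" ((PySem.List.pyRange 0 N 1).map (fun j =>
      drawTableGet (PySem.Int.mod (i * N + j) 6) ++ " ")) ++ "\n"))

-- ===== PRECONDITION & SPEC =====
def Spec_draw_xyz (N : Int) (out : String) : Prop := out = draw_xyz_alt N
instance (N : Int) (out : String) : Decidable (Spec_draw_xyz N out) := by unfold Spec_draw_xyz; infer_instance

-- ===== CLAIM =====
def Claim_equal_draw_xyz : Prop := ∀ (N : Int), Dom_draw_xyz N → Spec_draw_xyz N (draw_xyz N)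

-- ===== LEMMAS AND PROOFS =====

theorem join_empty_cons (a : String) (l : List String) :
    PySem.Str.join "" (a :: l) = a ++ PySem.Str.join "" l := by
  cases l <;> simp [PySem.Str.join, PySem.Chars.join, List.intercalate]

-- A fold that only appends to its string accumulator is the join of the pieces.
theorem foldl_strAppend (f : Int → String) (l : List Int) (acc : String) :
    l.foldl (fun s k => s ++ f k) acc = acc ++ PySem.Str.join "" (l.map f) := by
  induction l generalizing acc with
  | nil => simp [PySem.Str.join, PySem.Chars.join, List.intercalate]
  | cons a t ih =>
      simp only [List.foldl_cons, List.map_cons, ih, join_empty_cons]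
      rw [String.append_assoc]

-- per-cell: A's modular branch chain equals B's period-6 table lookup.
theorem cell_eq (k : Int) :
    (if PySem.Int.mod (k + 1) 3 == 0 then ("X " : String)
     else if PySem.Int.mod (k + 1) 2 == 1 then "Y " else "Z ") =
    drawTableGet (PySem.Int.mod k 6) ++ " " := by
  rw [PySem.Int.mod_eq_emod_of_pos (by norm_num : (0:Int) < 3),
      PySem.Int.mod_eq_emod_of_pos (by norm_num : (0:Int) < 2),
      PySem.Int.mod_eq_emod_of_pos (by norm_num : (0:Int) < 6)]
  have h6 : k % 6 = 0 ∨ k % 6 = 1 ∨ k % 6 = 2 ∨ k % 6 = 3 ∨ k % 6 = 4 ∨ k % 6 = 5 := by omega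
  rcases h6 with h | h | h | h | h | h
  · have h3 : (k + 1) % 3 = 1 := by omega
    have h2 : (k + 1) % 2 = 1 := by omega
    rw [h, h3, h2]; decide
  · have h3 : (k + 1) % 3 = 2 := by omega
    have h2 : (k + 1) % 2 = 0 := by omega
    rw [h, h3, h2]; decide
  · have h3 : (k + 1) % 3 = 0 := by omega
    rw [h, h3]; simp only [BEq.rfl, if_true]; decide
  · have h3 : (k + 1) % 3 = 1 := by omega
    have h2 : (k + 1) % 2 = 0 := by omega
    rw [h, h3, h2]; decide
  · have h3 : (k + 1) % 3 = 2 := by omega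
    have h2 : (k + 1) % 2 = 1 := by omega
    rw [h, h3, h2]; decide
  · have h3 : (k + 1) % 3 = 0 := by omega
    rw [h, h3]; simp only [BEq.rfl, if_true]; decide

theorem draw_xyz_spec : Claim_equal_draw_xyz := by
  intro N _
  unfold Spec_draw_xyz draw_xyz draw_xyz_alt
  have inner : ∀ i ∈ PySem.List.pyRange 0 N 1, ∀ acc : String,
      (PySem.List.pyRange 0 N 1).foldl (fun pattern j =>
        let index := i * N + j + 1
        if PySem.Int.mod index 3 == 0 then pattern ++ "X "
        else if PySem.Int.mod index 2 == 1 then pattern ++ "Y "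
        else pattern ++ "Z ") acc =
      acc ++ PySem.Str.join "" ((PySem.List.pyRange 0 N 1).map (fun j =>
        drawTableGet (PySem.Int.mod (i * N + j) 6) ++ " ")) := by
    intro i hi acc
    rw [PySem.List.foldl_congr_mem _ _
        (fun pattern j => pattern ++ (drawTableGet (PySem.Int.mod (i * N + j) 6) ++ " ")) acc ?_]
    · exact foldl_strAppend _ _ _
    · intro pattern j hj
      have hcell := cell_eq (i * N + j)
      show (if PySem.Int.mod (i * N + j + 1) 3 == 0 then pattern ++ "X "
            else if PySem.Int.mod (i * N + j + 1) 2 == 1 then pattern ++ "Y "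
            else pattern ++ "Z ") = _
      rw [show (if PySem.Int.mod (i * N + j + 1) 3 == 0 then pattern ++ "X "
            else if PySem.Int.mod (i * N + j + 1) 2 == 1 then pattern ++ "Y "
            else pattern ++ "Z ") =
          pattern ++ (if PySem.Int.mod (i * N + j + 1) 3 == 0 then "X "
            else if PySem.Int.mod (i * N + j + 1) 2 == 1 then "Y " else "Z ") from by
        split_ifs <;> rfl]
      rw [hcell]
  rw [PySem.List.foldl_congr_mem _ _
      (fun pattern i => pattern ++ (PySem.Str.join "" ((PySem.List.pyRange 0 N 1).map (fun j =>
        drawTableGet (PySem.Int.mod (i * N + j) 6) ++ " ")) ++ "\n")) "" ?_]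
  · rw [foldl_strAppend]
    simp
  · intro s i hi
    rw [inner i hi s, String.append_assoc]
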